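-- pv_equiv track=rewrite | github.com/SkrighYZ/FGVE | oscar/run_ve_amr.py | _clean_node_token
-- ===== SOURCE A (Python) =====
-- def _clean_node_token(tokens_n):
--     if not tokens_n[0].startswith('z'):
--         return ''.join(tokens_n).replace('##', '')
--     tokens_n = ' '.join(tokens_n).replace(' ##', '').split(' ')
--     z = tokens_n[0]
--     name = ''.join([t for t in tokens_n[1:] if not t == z])
--     ke_str = ' '.join([z, name])
--     return ke_str.lower()
-- ===== SOURCE B (Python) =====
-- def _clean_node_token(tokens_n):
--     if not tokens_n[0].startswith('z'):
--         # remove '##' pairs by an explicit index scan over the joined string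
--         s = ''.join(tokens_n)
--         out = []
--         i = 0
--         while i < len(s):
--             if s[i:i+2] == '##':
--                 i += 2
--             else:
--                 out.append(s[i])
--                 i += 1
--         return ''.join(out)
--     # build the merged groups BACK-TO-FRONT: walk the tokens in reverse,
--     # accumulating '##' continuations into a pending suffix that is attached
--     # when the group's head token is reached
--     groups = []
--     pending = ''
--     for t in reversed(tokens_n):
--         if t.startswith('##'):
--             pending = t[2:] + pending
--         else:
--             groups.append(t + pending)
--             pending = ''
--     groups.reverse()
--     z = groups[0]
--     name = ''.join(g for g in groups[1:] if g != z)
--     return (z + ' ' + name).lower()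
-- ===== Notes on version B (the rewrite author's own statement) =====
-- stated objective: alternative
-- what changed: Branch 1 removes '##' pairs by an explicit index scan over the joined string instead of str.replace; the 'z' branch builds the merged groups back-to-front, walking the tokens in REVERSE and accumulating '##' continuations into a pending suffix attached when each group's head token is reached, instead of A's forward ' '.join/.replace(' ##','')/.split(' ') string-encoding trick.
-- outside the precondition, e.g. on _clean_node_token(['z1', 'a b']): A returns 'z1 ab', B returns 'z1 a b'
import Mathlib
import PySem

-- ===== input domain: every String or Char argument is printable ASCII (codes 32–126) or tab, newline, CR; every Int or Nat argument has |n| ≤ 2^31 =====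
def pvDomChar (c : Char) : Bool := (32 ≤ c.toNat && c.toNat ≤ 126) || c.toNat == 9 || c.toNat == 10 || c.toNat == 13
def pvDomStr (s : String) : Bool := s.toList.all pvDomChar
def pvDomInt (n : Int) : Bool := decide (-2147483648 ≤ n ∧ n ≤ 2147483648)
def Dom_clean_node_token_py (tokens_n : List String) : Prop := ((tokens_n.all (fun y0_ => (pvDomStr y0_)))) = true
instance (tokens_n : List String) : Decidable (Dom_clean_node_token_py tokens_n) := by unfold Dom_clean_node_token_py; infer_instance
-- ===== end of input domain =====

-- B drops '##' pairs by an explicit character scan (branch 1) and builds the merged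
-- groups back-to-front by a reverse token pass with a pending-suffix accumulator
-- ('z' branch), instead of A's str.replace / join-replace-split string tricks
-- (same return value on Pre_; no speed claim).

-- ===== PORT A =====
def clean_node_token_py (tokens_n : List String) : String :=
  match PySem.List.pyGet? tokens_n 0 with
  | none => ""   -- tokens_n[0] raises IndexError on []; excluded by Pre_
  | some t0 =>
    if !(PySem.Str.startswith t0 "z") then
      PySem.Str.replace (PySem.Str.join "" tokens_n) "##" ""
    else
      let tks := (PySem.Str.split? (PySem.Str.replace (PySem.Str.join " " tokens_n) " ##" "") " ").getD []
      let z := (PySem.List.pyGet? tks 0).getD ""   -- split(' ') is never empty, so this index cannot raise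
      let name := PySem.Str.join "" ((PySem.List.slice tks (some 1) none).filter (fun t => !(t == z)))
      let ke_str := PySem.Str.join " " [z, name]
      PySem.Str.lower ke_str

-- ===== PORT B =====
-- Source B's branch-1 while loop over string indices, as structural recursion on the
-- remaining characters (s[i:i+2] == '##' is the ['#','#'] prefix test; i += 2 drops it)
def pvScanHH : List Char → List Char
  | [] => []
  | c :: t => if ['#','#'].isPrefixOf (c :: t) then pvScanHH (t.drop 1) else c :: pvScanHH t
termination_by l => l.length
decreasing_by
  · simp only [List.length_cons, List.length_drop]; omega
  · simp

def clean_node_token_py_alt (tokens_n : List String) : String :=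
  match PySem.List.pyGet? tokens_n 0 with
  | none => ""   -- tokens_n[0] raises IndexError on []; excluded by Pre_
  | some t0 =>
    if !(PySem.Str.startswith t0 "z") then
      String.ofList (pvScanHH (PySem.Str.join "" tokens_n).toList)
    else
      -- reverse pass: (groups-so-far in encounter order, pending suffix)
      let st := (tokens_n.reverse).foldl
        (fun (st : List String × String) t =>
          if PySem.Str.startswith t "##" then (st.1, PySem.Str.slice t (some 2) none ++ st.2)
          else (st.1 ++ [t ++ st.2], "")) ([], "")
      let groups := st.1.reverse
      let z := (PySem.List.pyGet? groups 0).getD ""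
      let name := PySem.Str.join "" ((PySem.List.slice groups (some 1) none).filter (fun g => !(g == z)))
      PySem.Str.lower (z ++ " " ++ name)

-- ===== PRECONDITION & SPEC =====
-- Pre_ excludes the empty list, where A raises IndexError, and 'z'-branch inputs with a
-- token containing a space character: there A's join/replace/split encoding splits such a
-- token at its internal spaces while B keeps it whole — both behaviours are defensible on
-- a corner the wordpiece tokenizer never produces, and no one would specify either.
def Pre_clean_node_token_py (tokens_n : List String) : Prop :=
  tokens_n ≠ [] ∧
    (PySem.Str.startswith ((tokens_n.head?).getD "") "z" = true →
      ∀ t ∈ tokens_n, (' ' : Char) ∉ t.toList)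
instance (tokens_n : List String) : Decidable (Pre_clean_node_token_py tokens_n) := by
  unfold Pre_clean_node_token_py; infer_instance
def pvWitness_clean_node_token_py : List String := ["z1", "##a", "bob"]

def Spec_clean_node_token_py (tokens_n : List String) (out : String) : Prop := out = clean_node_token_py_alt tokens_n
instance (tokens_n : List String) (out : String) : Decidable (Spec_clean_node_token_py tokens_n out) := by unfold Spec_clean_node_token_py; infer_instance

-- ===== CLAIM (what is proved, stated in full; the proofs are below) =====
def Claim_equal_clean_node_token_py : Prop := ∀ (tokens_n : List String), Dom_clean_node_token_py tokens_n → Pre_clean_node_token_py tokens_n → Spec_clean_node_token_py tokens_n (clean_node_token_py tokens_n)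

-- ===== LEMMAS AND PROOFS =====
def replS : List Char → List Char
  | [] => []
  | c :: t =>
    if [' ','#','#'].isPrefixOf (c :: t) then replS (t.drop 2)
    else c :: replS t
termination_by l => l.length
decreasing_by
  · simp only [List.length_cons, List.length_drop]; omega
  · simp

theorem go_repl (fuel : Nat) : ∀ (l acc : List Char), l.length ≤ fuel →
    PySem.Chars.replace.go [' ','#','#'] [] fuel l acc = acc.reverse ++ replS l := by
  induction fuel with
  | zero =>
    intro l acc h
    have hl : l = [] := by cases l <;> simp_all
    subst hl
    rw [PySem.Chars.replace.go]; simp [replS]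
  | succ n ih =>
    intro l acc h
    cases l with
    | nil =>
      rw [PySem.Chars.replace.go]
      all_goals first | omega | simp [replS]
    | cons c t =>
      rw [PySem.Chars.replace.go]
      by_cases hp : [' ','#','#'].isPrefixOf (c :: t)
      · rw [if_pos hp]
        have hlen : (List.drop 3 (c :: t)).length ≤ n := by
          simp only [List.length_drop]; simp at h ⊢; omega
        rw [show List.drop ([' ','#','#'] : List Char).length (c :: t) = List.drop 3 (c :: t) from rfl]
        rw [ih _ _ hlen]
        rw [replS, if_pos hp]
        simp [List.drop]
      · rw [if_neg hp]
        have hlen : t.length ≤ n := by simp at h; omega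
        rw [ih _ _ hlen]
        rw [replS, if_neg hp]
        simp

theorem repl_eq (s : List Char) : PySem.Chars.replace s [' ','#','#'] [] = replS s := by
  rw [PySem.Chars.replace]
  simp only [List.isEmpty_cons, Bool.false_eq_true, if_false]
  exact go_repl s.length s [] le_rfl

-- branch 1: PySem's replace with pattern "##" and empty replacement IS Source B's scan
theorem go_replHH (fuel : Nat) : ∀ (l acc : List Char), l.length ≤ fuel →
    PySem.Chars.replace.go ['#','#'] [] fuel l acc = acc.reverse ++ pvScanHH l := by
  induction fuel with
  | zero =>
    intro l acc h
    have hl : l = [] := by cases l <;> simp_all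
    subst hl
    rw [PySem.Chars.replace.go]; simp [pvScanHH]
  | succ n ih =>
    intro l acc h
    cases l with
    | nil =>
      rw [PySem.Chars.replace.go]
      all_goals first | omega | simp [pvScanHH]
    | cons c t =>
      rw [PySem.Chars.replace.go]
      by_cases hp : ['#','#'].isPrefixOf (c :: t)
      · rw [if_pos hp]
        have hlen : (List.drop 2 (c :: t)).length ≤ n := by
          simp only [List.length_drop]; simp at h ⊢; omega
        rw [show List.drop (['#','#'] : List Char).length (c :: t) = List.drop 2 (c :: t) from rfl]
        rw [ih _ _ hlen]
        rw [pvScanHH, if_pos hp]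
        simp [List.drop]
      · rw [if_neg hp]
        have hlen : t.length ≤ n := by simp at h; omega
        rw [ih _ _ hlen]
        rw [pvScanHH, if_neg hp]
        simp

theorem replHH_eq (s : List Char) : PySem.Chars.replace s ['#','#'] [] = pvScanHH s := by
  rw [PySem.Chars.replace]
  simp only [List.isEmpty_cons, Bool.false_eq_true, if_false]
  exact go_replHH s.length s [] le_rfl

def split1 : List Char → List (List Char)
  | [] => [[]]
  | c :: t => if c = ' ' then [] :: split1 t else (split1 t).modifyHead (c :: ·)

theorem split1_shape (l : List Char) : ∃ h r, split1 l = h :: r := by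
  induction l with
  | nil => exact ⟨[], [], rfl⟩
  | cons c t ih =>
    obtain ⟨h, r, hr⟩ := ih
    by_cases hc : c = ' '
    · exact ⟨[], split1 t, by simp [split1, hc]⟩
    · exact ⟨c :: h, r, by simp [split1, hc, hr, List.modifyHead]⟩

theorem go_split (fuel : Nat) : ∀ (l cur : List Char) (accL : List (List Char)), l.length < fuel →
    PySem.Chars.splitOn.go [' '] fuel l cur accL = accL.reverse ++ (split1 l).modifyHead (cur.reverse ++ ·) := by
  induction fuel with
  | zero => intro l cur accL h; omega
  | succ n ih =>
    intro l cur accL h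
    cases l with
    | nil =>
      rw [PySem.Chars.splitOn.go]
      all_goals first | omega | simp [split1, List.modifyHead]
    | cons c t =>
      rw [PySem.Chars.splitOn.go]
      by_cases hc : c = ' '
      · have hp : ([' '] : List Char).isPrefixOf (c :: t) := by simp [List.isPrefixOf, hc]
        rw [if_pos hp]
        have ht : t.length < n := by simp at h; omega
        rw [show List.drop ([' '] : List Char).length (c :: t) = t from rfl]
        rw [ih t [] _ ht]
        obtain ⟨x, y, hxy⟩ := split1_shape t
        simp [split1, hc, hxy, List.modifyHead]
      · have hp : ¬ ([' '] : List Char).isPrefixOf (c :: t) := by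
          simp [List.isPrefixOf]; intro h'; exact absurd h'.symm hc
        rw [if_neg hp]
        have ht : t.length < n := by simp at h; omega
        rw [ih t (c :: cur) _ ht]
        obtain ⟨x, y, hxy⟩ := split1_shape t
        simp [split1, hc, hxy, List.modifyHead]

theorem split_eq (s : List Char) : PySem.Chars.splitOn s [' '] = split1 s := by
  rw [PySem.Chars.splitOn]
  rw [go_split (s.length + 1) s [] [] (by omega)]
  obtain ⟨h, r, hr⟩ := split1_shape s
  simp [hr, List.modifyHead]

def tailJoin : List (List Char) → List Char
  | [] => []
  | u :: us => (' ' :: u) ++ tailJoin us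

def glueS : List (List Char) → List Char
  | [] => []
  | u :: us => if ['#','#'].isPrefixOf u then u.drop 2 ++ glueS us else (' ' :: u) ++ glueS us

theorem join_cons (x : List Char) (xs : List (List Char)) :
    PySem.Chars.join [' '] (x :: xs) = x ++ tailJoin xs := by
  induction xs generalizing x with
  | nil => simp [PySem.Chars.join, List.intercalate, tailJoin, List.intersperse]
  | cons y ys ih =>
    have h : PySem.Chars.join [' '] (x :: y :: ys) = x ++ [' '] ++ PySem.Chars.join [' '] (y :: ys) := by
      simp only [PySem.Chars.join, List.intercalate]
      rw [List.intersperse]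
      all_goals simp
    rw [h, ih y, tailJoin]
    simp

theorem replS_append (p r : List Char) (h : (' ' : Char) ∉ p) : replS (p ++ r) = p ++ replS r := by
  induction p with
  | nil => simp
  | cons c p' ih =>
    have hc : c ≠ ' ' := fun hc => h (by simp [hc])
    have hnp : ¬ ([' ','#','#'] : List Char).isPrefixOf (c :: (p' ++ r)) := by
      simp [List.isPrefixOf]; intro h'; exact absurd h'.symm hc
    rw [List.cons_append, replS, if_neg hnp, ih (fun hm => h (by simp [hm]))]
    simp

theorem tailJoin_shape (us : List (List Char)) : tailJoin us = [] ∨ ∃ r, tailJoin us = ' ' :: r := by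
  cases us with
  | nil => left; rfl
  | cons u us => right; exact ⟨u ++ tailJoin us, rfl⟩

theorem prefix_boundary (u : List Char) (us : List (List Char)) :
    (['#','#'] : List Char).isPrefixOf (u ++ tailJoin us) = (['#','#'] : List Char).isPrefixOf u := by
  rcases tailJoin_shape us with h | ⟨r, h⟩ <;> rw [h]
  · simp
  · match u with
    | [] => simp [List.isPrefixOf]
    | [c] => simp [List.isPrefixOf]
    | c :: d :: u' => simp [List.isPrefixOf]

theorem replS_tailJoin (us : List (List Char)) (h : ∀ u ∈ us, (' ' : Char) ∉ u) :
    replS (tailJoin us) = glueS us := by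
  induction us with
  | nil => simp [tailJoin, glueS, replS]
  | cons u us ih =>
    have hu : (' ' : Char) ∉ u := h u (by simp)
    have hus : ∀ v ∈ us, (' ' : Char) ∉ v := fun v hv => h v (by simp [hv])
    rw [tailJoin, glueS]
    have hcond : ([' ','#','#'] : List Char).isPrefixOf (' ' :: (u ++ tailJoin us))
        = (['#','#'] : List Char).isPrefixOf u := by
      rw [← prefix_boundary u us]
      simp [List.isPrefixOf]
    by_cases hp : (['#','#'] : List Char).isPrefixOf u
    · obtain ⟨u2, hu2⟩ := List.isPrefixOf_iff_prefix.mp hp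
      rw [List.cons_append, replS, hcond, if_pos hp]
      have hdrop : List.drop 2 (u ++ tailJoin us) = u.drop 2 ++ tailJoin us := by
        subst hu2; simp
      rw [hdrop, replS_append _ _ (fun hm => hu (List.mem_of_mem_drop hm)), ih hus, if_pos hp]
    · rw [List.cons_append, replS, hcond, if_neg hp, replS_append _ _ hu, ih hus, if_neg hp]
      simp

def mergeC : List Char → List (List Char) → List (List Char)
  | cur, [] => [cur]
  | cur, u :: us => if ['#','#'].isPrefixOf u then mergeC (cur ++ u.drop 2) us else cur :: mergeC u us
def mJoin : List (List Char) → List Char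
  | [] => []
  | m :: ms => m ++ tailJoin ms
theorem mergeC_shape (us : List (List Char)) : ∀ cur, ∃ h r, mergeC cur us = h :: r := by
  induction us with
  | nil => intro cur; exact ⟨cur, [], rfl⟩
  | cons u us ih =>
    intro cur
    by_cases hp : (['#','#'] : List Char).isPrefixOf u
    · obtain ⟨h, r, hr⟩ := ih (cur ++ u.drop 2)
      exact ⟨h, r, by rw [mergeC, if_pos hp, hr]⟩
    · exact ⟨cur, mergeC u us, by rw [mergeC, if_neg hp]⟩

theorem merge_spacefree (us : List (List Char)) : ∀ cur, (' ' : Char) ∉ cur →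
    (∀ u ∈ us, (' ' : Char) ∉ u) → ∀ m ∈ mergeC cur us, (' ' : Char) ∉ m := by
  induction us with
  | nil => intro cur hc _ m hm; simp [mergeC] at hm; subst hm; exact hc
  | cons u us ih =>
    intro cur hc h m hm
    have hu : (' ' : Char) ∉ u := h u (by simp)
    have hus : ∀ v ∈ us, (' ' : Char) ∉ v := fun v hv => h v (by simp [hv])
    by_cases hp : (['#','#'] : List Char).isPrefixOf u
    · rw [mergeC, if_pos hp] at hm
      refine ih _ ?_ hus m hm
      simp only [List.mem_append]
      rintro (h1 | h2)
      · exact hc h1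
      · exact hu (List.mem_of_mem_drop h2)
    · rw [mergeC, if_neg hp] at hm
      rcases List.mem_cons.mp hm with h1 | h2
      · subst h1; exact hc
      · exact ih u hu hus m h2

theorem merge_join (us : List (List Char)) : ∀ cur, (' ' : Char) ∉ cur →
    (∀ u ∈ us, (' ' : Char) ∉ u) → mJoin (mergeC cur us) = cur ++ glueS us := by
  induction us with
  | nil => intro cur _ _; simp [mergeC, mJoin, tailJoin, glueS]
  | cons u us ih =>
    intro cur hc h
    have hu : (' ' : Char) ∉ u := h u (by simp)
    have hus : ∀ v ∈ us, (' ' : Char) ∉ v := fun v hv => h v (by simp [hv])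
    by_cases hp : (['#','#'] : List Char).isPrefixOf u
    · rw [mergeC, if_pos hp, glueS, if_pos hp,
        ih _ (by
          simp only [List.mem_append]
          rintro (h1 | h2)
          · exact hc h1
          · exact hu (List.mem_of_mem_drop h2)) hus]
      simp
    · rw [mergeC, if_neg hp, glueS, if_neg hp]
      obtain ⟨mh, mr, hm⟩ := mergeC_shape us u
      have ht : tailJoin (mergeC u us) = ' ' :: mJoin (mergeC u us) := by
        rw [hm, tailJoin, mJoin]; rfl
      rw [mJoin, ht, ih u hu hus]
      simp

theorem split1_spacefree (m : List Char) (h : (' ' : Char) ∉ m) : split1 m = [m] := by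
  induction m with
  | nil => rfl
  | cons c t ih =>
    have hc : c ≠ ' ' := fun hc => h (by simp [hc])
    rw [split1, if_neg hc, ih (fun hm => h (by simp [hm]))]
    rfl

theorem split1_append (p : List Char) (r : List Char) (h : (' ' : Char) ∉ p) :
    split1 (p ++ r) = (split1 r).modifyHead (p ++ ·) := by
  induction p with
  | nil =>
    obtain ⟨x, y, hxy⟩ := split1_shape r
    simp [hxy, List.modifyHead]
  | cons c p' ih =>
    have hc : c ≠ ' ' := fun hc => h (by simp [hc])
    rw [List.cons_append, split1, if_neg hc, ih (fun hm => h (by simp [hm]))]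
    obtain ⟨x, y, hxy⟩ := split1_shape r
    simp [hxy, List.modifyHead]

theorem split1_mJoin (r : List (List Char)) : ∀ h : List Char, (∀ m ∈ h :: r, (' ' : Char) ∉ m) →
    split1 (mJoin (h :: r)) = h :: r := by
  induction r with
  | nil =>
    intro h hs
    rw [mJoin, tailJoin, List.append_nil, split1_spacefree h (hs h (by simp))]
  | cons u r' ih =>
    intro h hs
    have hh : (' ' : Char) ∉ h := hs h (by simp)
    have hrest : ∀ m ∈ u :: r', (' ' : Char) ∉ m := by
      intro m hm
      apply hs m
      simp [List.mem_cons] at hm ⊢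
      tauto
    have key : mJoin (h :: u :: r') = h ++ ' ' :: mJoin (u :: r') := by
      rw [mJoin, tailJoin, mJoin]; simp
    rw [key, split1_append h _ hh, split1, if_pos rfl, ih u hrest]
    simp [List.modifyHead]

def mergeS : String → List String → List String
  | cur, [] => [cur]
  | cur, t :: ts =>
    if PySem.Str.startswith t "##" then mergeS (cur ++ PySem.Str.slice t (some 2) none) ts
    else cur :: mergeS t ts

theorem startswith_hash (t : String) :
    PySem.Str.startswith t "##" = (['#','#'] : List Char).isPrefixOf t.toList := by
  simp [PySem.Str.startswith, PySem.Chars.startswith]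
theorem slice_two (t : String) :
    (PySem.Str.slice t (some 2) none).toList = t.toList.drop 2 := by
  simp
  simpa using PySem.List.slice_from t.toList (by norm_num)
theorem merge_bridge (ts : List String) : ∀ cur : String,
    (mergeS cur ts).map String.toList = mergeC cur.toList (ts.map String.toList) := by
  induction ts with
  | nil => intro cur; simp [mergeS, mergeC]
  | cons t ts ih =>
    intro cur
    rw [mergeS, List.map_cons, mergeC, startswith_hash]
    by_cases hp : (['#','#'] : List Char).isPrefixOf t.toList
    · rw [if_pos hp, if_pos hp, ih]
      congr 1
      rw [String.toList_append, slice_two]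
    · rw [if_neg hp, if_neg hp, List.map_cons, ih]
theorem pyGet_zero {α : Type} (x : α) (xs : List α) :
    PySem.List.pyGet? (x :: xs) (0 : Int) = some x := by
  simp [PySem.List.pyGet?, PySem.List.pyIdx?]

theorem toList_inj' (a b : String) (h : a.toList = b.toList) : a = b := by
  have := congrArg String.ofList h
  simpa using this
theorem join_two (a b : String) : PySem.Str.join " " [a, b] = a ++ " " ++ b := by
  apply toList_inj'
  simp only [PySem.Str.join]
  rw [show (" " : String).toList = [' '] from rfl]
  simp only [List.map_cons, List.map_nil, String.toList_ofList]
  rw [join_cons]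
  simp [tailJoin]

-- B's reverse-pass step (foldr form, after List.foldl_reverse)
def pvRevStep (t : String) (st : List String × String) : List String × String :=
  if PySem.Str.startswith t "##" then (st.1, PySem.Str.slice t (some 2) none ++ st.2)
  else (st.1 ++ [t ++ st.2], "")

theorem append_empty' (s : String) : s ++ "" = s := by
  apply toList_inj'; simp

-- reverse pass characterizes the forward merge
theorem revmerge (l : List String) : ∀ cur : String,
    mergeS cur l = ((l.foldr pvRevStep ([], "")).1 ++ [cur ++ (l.foldr pvRevStep ([], "")).2]).reverse := by
  induction l with
  | nil => intro cur; simp [mergeS]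
  | cons t ts ih =>
    intro cur
    rw [List.foldr_cons]
    by_cases hs : PySem.Str.startswith t "##"
    · rw [mergeS, if_pos hs, ih]
      simp only [pvRevStep, hs, if_pos]
      rw [String.append_assoc]
    · rw [mergeS, if_neg hs, ih t]
      simp only [pvRevStep, hs, Bool.false_eq_true, if_false]
      rw [append_empty']
      simp

theorem z_not_hash (t : String) (hz : PySem.Str.startswith t "z" = true) :
    PySem.Str.startswith t "##" = false := by
  have : ('z' : Char) :: [] <+: t.toList := by
    have := hz
    simp [PySem.Str.startswith, PySem.Chars.startswith, List.isPrefixOf_iff_prefix] at this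
    simpa using this
  obtain ⟨r, hr⟩ := this
  rw [startswith_hash, ← hr]
  simp [List.isPrefixOf]

-- ===== VERDICT (by name: the statement is the Claim_ definition above) =====
theorem clean_node_token_py_spec : Claim_equal_clean_node_token_py := by
  intro tokens_n _ hpre
  unfold Spec_clean_node_token_py
  obtain ⟨hne, hsp⟩ := hpre
  cases tokens_n with
  | nil => exact absurd rfl hne
  | cons t0 rest =>
    unfold clean_node_token_py clean_node_token_py_alt
    rw [pyGet_zero]
    simp only
    by_cases hz : PySem.Str.startswith t0 "z"
    · simp only [hz, Bool.not_true, Bool.false_eq_true, if_false]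
      have hsfree : ∀ t ∈ t0 :: rest, (' ' : Char) ∉ t.toList := by
        apply hsp; simpa using hz
      have hsf0 : (' ' : Char) ∉ t0.toList := hsfree t0 (by simp)
      have hsfr : ∀ u ∈ rest.map String.toList, (' ' : Char) ∉ u := by
        intro u hu
        obtain ⟨s, hs, rfl⟩ := List.mem_map.mp hu
        exact hsfree s (by simp [hs])
      -- B's groups = mergeS t0 rest
      have hfoldB : ((t0 :: rest).reverse.foldl
          (fun (st : List String × String) t =>
            if PySem.Str.startswith t "##" then (st.1, PySem.Str.slice t (some 2) none ++ st.2)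
            else (st.1 ++ [t ++ st.2], "")) ([], "")) = (t0 :: rest).foldr pvRevStep ([], "") := by
        rw [List.foldl_reverse]
        rfl
      have hgroups : (((t0 :: rest).foldr pvRevStep ([], "")).1).reverse = mergeS t0 rest := by
        rw [List.foldr_cons]
        have h0 : pvRevStep t0 (rest.foldr pvRevStep ([], ""))
            = ((rest.foldr pvRevStep ([], "")).1 ++ [t0 ++ (rest.foldr pvRevStep ([], "")).2], "") := by
          simp only [pvRevStep, z_not_hash t0 hz, Bool.false_eq_true, if_false]
        rw [h0, revmerge rest t0]
      -- A's tks = mergeS t0 rest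
      have h1 : (PySem.Str.join " " (t0 :: rest)).toList
          = t0.toList ++ tailJoin (rest.map String.toList) := by
        simp only [PySem.Str.join]
        rw [show (" " : String).toList = [' '] from rfl]
        simp only [List.map_cons, String.toList_ofList]
        rw [join_cons]
      have h2 : (PySem.Str.replace (PySem.Str.join " " (t0 :: rest)) " ##" "").toList
          = mJoin (mergeC t0.toList (rest.map String.toList)) := by
        simp only [PySem.Str.replace]
        rw [show (" ##" : String).toList = [' ','#','#'] from rfl,
            show ("" : String).toList = [] from rfl]
        simp only [String.toList_ofList]
        rw [repl_eq, h1, replS_append _ _ hsf0, replS_tailJoin _ hsfr,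
            merge_join _ _ hsf0 hsfr]
      have h3 : PySem.Str.split? (PySem.Str.replace (PySem.Str.join " " (t0 :: rest)) " ##" "") " "
          = some (((mergeS t0 rest).map String.toList).map String.ofList) := by
        simp only [PySem.Str.split?]
        rw [show (" " : String).toList = [' '] from rfl]
        simp only [PySem.Chars.split?, List.isEmpty_cons, Bool.false_eq_true, if_false]
        rw [split_eq, h2]
        obtain ⟨mh, mr, hm⟩ := mergeC_shape (rest.map String.toList) t0.toList
        have hall : ∀ m ∈ mergeC t0.toList (rest.map String.toList), (' ' : Char) ∉ m :=
          merge_spacefree _ _ hsf0 hsfr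
        rw [hm, split1_mJoin _ _ (by rw [← hm]; exact hall), ← hm, ← merge_bridge]
        simp
      have hAlist : (PySem.Str.split? (PySem.Str.replace (PySem.Str.join " " (t0 :: rest)) " ##" "") " ").getD []
          = mergeS t0 rest := by
        rw [h3]
        simp [Function.comp_def]
      simp only [hfoldB, hgroups, hAlist, join_two]
    · have hb : (!PySem.Str.startswith t0 "z") = true := by
        simp only [Bool.not_eq_true] at hz
        rw [hz]
        rfl
      rw [if_pos hb, if_pos hb]
      -- branch 1: replace "##" "" is the explicit ## scan
      apply toList_inj'
      simp only [PySem.Str.replace]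
      rw [show ("##" : String).toList = ['#','#'] from rfl,
          show ("" : String).toList = [] from rfl]
      simp only [String.toList_ofList]
      rw [replHH_eq]
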